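-- pv_equiv track=rewrite | github.com/HongBo0502/MonashProjects | FIT3155 - Advanced data structures and algorithms/Assignment1/q2/q2.py | matched_prefix
-- ===== SOURCE A (Python) =====
-- def matched_prefix(z_suffix):
--     """
--     Create a matched prefix table
--     Input: the z array of the pattern
--     Output: the matched prefix table
--     Time Complexity: O(n) where n is the length of the pattern
--     Space Complexity: O(n) where n is the length of the pattern
--     """
--     len_pat=len(z_suffix)
--     mp=[0]*(len_pat+1)
--
--     for i in range(0,len_pat):
--
--         j=len_pat-i-1
--         z=z_suffix[i]
--
--         if i-z == -1 and z >mp[j+1]: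
--             mp[j] = z
--         else:
--             mp[j] = mp[j+1]
--     return mp
-- ===== SOURCE B (Python) =====
-- def matched_prefix(z_suffix):
--     """Two-phase segment fill: collect the border lengths (positions i with
--     z_suffix[i] == i+1 give a border of length i+1), then write each one as a
--     contiguous constant segment of the table from the largest border down --
--     every cell is written at most once and no running maximum is kept."""
--     n = len(z_suffix)
--     borders = [i + 1 for i, z in enumerate(z_suffix) if z == i + 1]
--     mp = [0] * (n + 1)
--     lo = 0
--     for v in reversed(borders):
--         hi = n - v + 1
--         for j in range(lo, hi):
--             mp[j] = v
--         lo = hi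
--     return mp
-- ===== Notes on version B (the rewrite author's own statement) =====
-- stated objective: alternative
-- what changed: A makes one fused forward pass keeping a running maximum compared against the next table cell; B first collects the border lengths (i+1 where z_suffix[i]==i+1) and then writes the table in a second phase as contiguous constant segments, largest border first, each cell written at most once with no maximum ever computed.
import Mathlib
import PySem

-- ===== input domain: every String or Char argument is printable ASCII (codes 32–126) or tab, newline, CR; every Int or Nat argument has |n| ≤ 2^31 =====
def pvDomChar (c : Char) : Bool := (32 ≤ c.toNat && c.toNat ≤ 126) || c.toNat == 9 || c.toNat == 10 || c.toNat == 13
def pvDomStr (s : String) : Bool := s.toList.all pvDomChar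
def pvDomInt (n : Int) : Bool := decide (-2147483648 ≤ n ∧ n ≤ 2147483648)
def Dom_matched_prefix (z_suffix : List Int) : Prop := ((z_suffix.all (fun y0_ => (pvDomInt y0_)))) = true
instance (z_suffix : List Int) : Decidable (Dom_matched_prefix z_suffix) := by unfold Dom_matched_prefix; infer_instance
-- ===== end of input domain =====

-- B replaces A's fused forward pass with a running maximum by a two-phase
-- algorithm: collect the border lengths, then fill the table as contiguous
-- constant segments, largest border first (objective: alternative).

-- ===== PORT A =====
-- range(0, len) iterates Nat indices 0..len-1; z_suffix[i] and mp[j]/mp[j+1] are always in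
-- range there, so getD/set are exact.
def matched_prefix (z_suffix : List Int) : List Int :=
  let len_pat := z_suffix.length
  let mp := List.replicate (len_pat + 1) (0 : Int)
  (List.range len_pat).foldl (fun mp i =>
    let j := len_pat - i - 1
    let z := z_suffix.getD i 0
    if (i : Int) - z = -1 ∧ z > mp.getD (j + 1) 0 then
      mp.set j z
    else
      mp.set j (mp.getD (j + 1) 0)) mp

-- ===== PORT B =====
-- the comprehension '[i + 1 for i, z in enumerate(z_suffix) if z == i + 1]'
def pvBorders (zs : List Int) : List Int :=
  ((PySem.List.enumerate zs).filter (fun p => p.2 == p.1 + 1)).map (fun p => p.1 + 1)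

-- reversed(borders) → .reverse; the fill loop 'for j in range(lo, hi): mp[j] = v'
-- is a foldl over pyRange lo hi 1; every j there satisfies 0 ≤ lo ≤ j < hi ≤ n+1,
-- so the in-range assignment mp[j] = v is exactly mp.set j.toNat v.
def matched_prefix_alt (z_suffix : List Int) : List Int :=
  let n := z_suffix.length
  let borders := pvBorders z_suffix
  let st := borders.reverse.foldl (fun (st : List Int × Int) v =>
      let hi : Int := (n : Int) - v + 1
      ((PySem.List.pyRange st.2 hi 1).foldl (fun mp j => mp.set j.toNat v) st.1, hi))
    (List.replicate (n + 1) (0 : Int), 0)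
  st.1

-- ===== PRECONDITION & SPEC =====
def Spec_matched_prefix (z_suffix : List Int) (out : List Int) : Prop := out = matched_prefix_alt z_suffix
instance (z_suffix : List Int) (out : List Int) : Decidable (Spec_matched_prefix z_suffix out) := by unfold Spec_matched_prefix; infer_instance

-- ===== CLAIM (what is proved, stated in full; the proofs are below) =====
def Claim_equal_matched_prefix : Prop := ∀ (z_suffix : List Int), Dom_matched_prefix z_suffix → Spec_matched_prefix z_suffix (matched_prefix z_suffix)

-- ===== LEMMAS AND PROOFS =====

/-- Forward running-max recursion describing A's pass: processes `zs` starting at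
index `i` with current maximum `m`; returns the list of running maxima and the final one. -/
def pvGo (zs : List Int) (i m : Int) : List Int × Int :=
  match zs with
  | [] => ([], m)
  | z :: rest =>
      let m' := if z = i + 1 then max m z else m
      let r := pvGo rest (i + 1) m'
      (m' :: r.1, r.2)

lemma pvGo_append (xs : List Int) (z : Int) : ∀ (i m : Int),
    pvGo (xs ++ [z]) i m =
      (let r := pvGo xs i m
       let m' := if z = i + (xs.length : Int) + 1 then max r.2 z else r.2
       (r.1 ++ [m'], m')) := by
  induction xs with
  | nil => intro i m; simp [pvGo]
  | cons x xs ih =>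
      intro i m
      simp only [List.cons_append, pvGo, ih]
      have h : i + 1 + (xs.length : Int) + 1 = i + ((x :: xs).length : Int) + 1 := by
        simp only [List.length_cons]; push_cast; ring
      rw [h]

lemma pvGo_head (zs : List Int) : ∀ (i m : Int),
    ((pvGo zs i m).1.reverse ++ [m]).getD 0 0 = (pvGo zs i m).2 := by
  induction zs with
  | nil => intro i m; simp [pvGo]
  | cons z rest ih =>
      intro i m
      simp only [pvGo, List.reverse_cons, List.append_assoc]
      rw [show ([(if z = i + 1 then max m z else m)] ++ [m] :
            List Int) = (if z = i + 1 then max m z else m) ::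
            ([m] ++ []) from by simp]
      have h := ih (i + 1) (if z = i + 1 then max m z else m)
      cases hrev : (pvGo rest (i + 1) (if z = i + 1 then max m z else m)).1.reverse with
      | nil => rw [hrev] at h; simpa using h.symm ▸ (by simp)
      | cons a t => rw [hrev] at h; simpa using h

lemma pvGo_bound (zs : List Int) : ∀ (i m : Int), m ≤ i →
    (pvGo zs i m).2 ≤ i + zs.length := by
  induction zs with
  | nil => intro i m h; simpa using h
  | cons z rest ih =>
      intro i m h
      simp only [pvGo, List.length_cons]
      have hm' : (if z = i + 1 then max m z else m) ≤ i + 1 := by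
        split_ifs with hz
        · subst hz; exact max_le (by omega) le_rfl
        · omega
      have := ih (i + 1) _ hm'
      push_cast
      push_cast at this
      omega

lemma set_replicate_succ (t : Nat) : ∀ (L : List Int) (v : Int),
    (List.replicate (t + 1) (0 : Int) ++ L).set t v = List.replicate t 0 ++ v :: L := by
  induction t with
  | zero => intro L v; simp
  | succ t ih =>
      intro L v
      rw [List.replicate_succ, List.cons_append, List.set_cons_succ, ih]
      rw [List.replicate_succ, List.cons_append]

lemma getD_replicate (t : Nat) : ∀ (L : List Int),
    (List.replicate t (0 : Int) ++ L).getD t 0 = L.getD 0 0 := by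
  induction t with
  | zero => intro L; simp
  | succ t ih => intro L; rw [List.replicate_succ, List.cons_append, List.getD_cons_succ, ih]

/-- A's loop computes the reversed running-max list followed by the trailing 0. -/
lemma matched_prefix_invariant (zs : List Int) (k : Nat) (hk : k ≤ zs.length) :
    (List.range k).foldl (fun mp i =>
      let j := zs.length - i - 1
      let z := zs.getD i 0
      if (i : Int) - z = -1 ∧ z > mp.getD (j + 1) 0 then
        mp.set j z
      else
        mp.set j (mp.getD (j + 1) 0)) (List.replicate (zs.length + 1) (0 : Int))
    = List.replicate (zs.length - k) 0 ++ (pvGo (zs.take k) 0 0).1.reverse ++ [0] := by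
  induction k with
  | zero =>
      simp [pvGo, List.replicate_succ']
  | succ k ih =>
      have hk' : k ≤ zs.length := by omega
      have hklt : k < zs.length := by omega
      rw [List.range_succ, List.foldl_append, ih hk']
      simp only [List.foldl_cons, List.foldl_nil]
      have hj : zs.length - k - 1 + 1 = zs.length - k := by omega
      have hget : ((List.replicate (zs.length - k) (0:Int) ++
          (pvGo (zs.take k) 0 0).1.reverse ++ [0])).getD (zs.length - k) 0
          = (pvGo (zs.take k) 0 0).2 := by
        rw [List.append_assoc, getD_replicate, pvGo_head]
      have hgetk : zs.getD k 0 = zs[k] := List.getD_eq_getElem zs 0 hklt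
      have htake : zs.take (k + 1) = zs.take k ++ [zs.getD k 0] := by
        rw [List.take_succ, List.getElem?_eq_getElem hklt, hgetk]; rfl
      have hlen : ((zs.take k).length : Int) = (k : Int) := by
        simp [List.length_take, Nat.min_eq_left hk']
      have hB : pvGo (zs.take (k + 1)) 0 0 =
          (let r := pvGo (zs.take k) 0 0
           let m' := if zs.getD k 0 = (k : Int) + 1 then max r.2 (zs.getD k 0) else r.2
           (r.1 ++ [m'], m')) := by
        rw [htake, pvGo_append]
        simp only [hlen, zero_add]
      rw [hj, hget]
      set mk := (pvGo (zs.take k) 0 0).2 with hmk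
      set z := zs.getD k 0 with hz
      have hval : (if (k : Int) - z = -1 ∧ z > mk then z else mk)
          = (if z = (k : Int) + 1 then max mk z else mk) := by
        split_ifs with h1 h2 h2
        · exact (max_eq_right (le_of_lt h1.2)).symm
        · exact absurd (by omega : z = (k:Int) + 1) h2
        · push_neg at h1
          have := h1 (by omega)
          exact (max_eq_left this).symm
        · rfl
      have hset : ∀ v : Int, (List.replicate (zs.length - k) (0:Int) ++
            (pvGo (zs.take k) 0 0).1.reverse ++ [0]).set (zs.length - k - 1) v
          = List.replicate (zs.length - (k+1)) 0 ++
            (v :: (pvGo (zs.take k) 0 0).1.reverse) ++ [0] := by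
        intro v
        have hrep : zs.length - k = (zs.length - k - 1) + 1 := by omega
        rw [List.append_assoc, hrep]
        simp only [Nat.add_sub_cancel]
        rw [set_replicate_succ]
        have h2 : zs.length - (k + 1) = zs.length - k - 1 := by omega
        rw [h2, List.append_assoc]
        simp
      have hrev : (pvGo (zs.take (k + 1)) 0 0).1.reverse
          = (if (k : Int) - z = -1 ∧ z > mk then z else mk) ::
            (pvGo (zs.take k) 0 0).1.reverse := by
        rw [hval, hB]
        simp only [List.reverse_append, List.reverse_cons, List.reverse_nil,
          List.nil_append, List.singleton_append]
        rfl
      rw [hrev]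
      split_ifs with hc
      · rw [hset z]
      · rw [hset mk]

/-- The segment picture both algorithms compute: given the borders in DESCENDING
order, the table is a concatenation of constant blocks ending in a zero block. -/
def pvBlocks : List Int → Int → List Int
  | [], hi => List.replicate (hi + 1).toNat 0
  | v :: ds, hi => List.replicate (hi - v + 1).toNat v ++ pvBlocks ds (v - 1)

/-- Well-formedness of a descending border list relative to an upper bound. -/
def pvChain : List Int → Int → Prop
  | [], _ => True
  | v :: ds, hi => 1 ≤ v ∧ v ≤ hi ∧ pvChain ds (v - 1)

lemma pvChain_mono (ds : List Int) : ∀ (h1 h2 : Int), h1 ≤ h2 → pvChain ds h1 → pvChain ds h2 := by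
  cases ds with
  | nil => intro _ _ _ _; trivial
  | cons v ds => intro h1 h2 hle hc; exact ⟨hc.1, le_trans hc.2.1 hle, hc.2.2⟩

lemma pvBorders_append (xs : List Int) (z : Int) :
    pvBorders (xs ++ [z]) =
      pvBorders xs ++ (if z = (xs.length : Int) + 1 then [(xs.length : Int) + 1] else []) := by
  unfold pvBorders
  rw [PySem.List.enumerate_append, List.filter_append, List.map_append]
  congr 1
  simp only [PySem.List.enumerate, PySem.List.enumerate_cons, PySem.List.enumerate_nil]
  by_cases h : z = (xs.length : Int) + 1
  · simp [h]
  · have hb : (z == (xs.length : Int) + 1) = false := by simpa using h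
    simp [hb, h]

/-- A's running-max output, described through the borders: reversed maxima ++ [0]
equals the block decomposition, and the final maximum is the last border. -/
lemma pvGo_blocks (zs : List Int) :
    (pvGo zs 0 0).1.reverse ++ [0] = pvBlocks (pvBorders zs).reverse zs.length ∧
    (pvGo zs 0 0).2 = ((pvBorders zs).reverse).headD 0 := by
  induction zs using List.reverseRecOn with
  | nil => constructor <;> simp [pvGo, pvBorders, pvBlocks, PySem.List.enumerate_nil]
  | append_singleton xs z ih =>
      obtain ⟨ih1, ih2⟩ := ih
      have hbound : (pvGo xs 0 0).2 ≤ (xs.length : Int) := by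
        simpa using pvGo_bound xs 0 0 le_rfl
      by_cases hz : z = (xs.length : Int) + 1
      · have hmax : max (pvGo xs 0 0).2 z = z := max_eq_right (by omega)
        constructor
        · rw [pvGo_append]
          simp only [zero_add, if_pos hz, hmax]
          rw [pvBorders_append, if_pos hz]
          simp only [List.reverse_append, List.reverse_singleton, List.reverse_cons,
            List.singleton_append, List.cons_append, List.append_assoc, List.nil_append]
          rw [ih1]
          show z :: (pvBlocks (pvBorders xs).reverse ↑xs.length) =
            pvBlocks (((xs.length : Int) + 1) :: (pvBorders xs).reverse) (((xs ++ [z]).length : Nat) : Int)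
          unfold pvBlocks
          have hlen : (((xs ++ [z]).length : Nat) : Int) = (xs.length : Int) + 1 := by
            simp
          rw [hlen]
          have h1 : (xs.length : Int) + 1 - ((xs.length : Int) + 1) + 1 = 1 := by ring
          rw [h1]
          have h2 : (xs.length : Int) + 1 - 1 = (xs.length : Int) := by ring
          rw [h2]
          simp only [hz, Int.toNat_one, List.replicate_one, List.singleton_append]
          congr 1
          exact (pvBlocks.eq_def _ _).symm
        · rw [pvGo_append]
          simp only [zero_add, if_pos hz, hmax]
          rw [pvBorders_append, if_pos hz]
          simp [hz]
      · constructor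
        · rw [pvGo_append]
          simp only [zero_add, if_neg hz]
          rw [pvBorders_append, if_neg hz, List.append_nil]
          simp only [List.reverse_append, List.reverse_singleton, List.singleton_append,
            List.cons_append, List.nil_append]
          rw [ih1, ih2]
          have hlen : (((xs ++ [z]).length : Nat) : Int) = (xs.length : Int) + 1 := by simp
          cases hd : (pvBorders xs).reverse with
          | nil =>
              show (0 : Int) :: pvBlocks [] ((xs.length : Nat) : Int) = pvBlocks [] (((xs ++ [z]).length : Nat) : Int)
              unfold pvBlocks
              rw [hlen]
              have h0 : ((xs.length : Int) + 1 + 1).toNat = ((xs.length : Int) + 1).toNat + 1 := by omega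
              rw [h0, List.replicate_succ]
          | cons v ds =>
              have hvle : v ≤ (xs.length : Int) := by
                have : (pvGo xs 0 0).2 = v := by rw [ih2, hd]; rfl
                omega
              show v :: pvBlocks (v :: ds) ((xs.length : Nat) : Int) = pvBlocks (v :: ds) (((xs ++ [z]).length : Nat) : Int)
              unfold pvBlocks
              rw [hlen]
              have h1 : (xs.length : Int) + 1 - v + 1 = ((xs.length : Int) - v + 1) + 1 := by ring
              rw [h1]
              have h0 : (((xs.length : Int) - v + 1) + 1).toNat = ((xs.length : Int) - v + 1).toNat + 1 := by
                omega
              rw [h0, List.replicate_succ]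
              simp
        · rw [pvGo_append]
          simp only [zero_add, if_neg hz]
          rw [pvBorders_append, if_neg hz, List.append_nil]
          exact ih2

/-- One segment fill: writing `v` into cells `W.length .. W.length + k - 1` of
`W ++ zeros` turns the first `k` zeros into `v`s. -/
lemma pvFill (v : Int) : ∀ (k : Nat) (W : List Int) (Z : Nat), k ≤ Z →
    (PySem.List.pyRange (W.length : Int) ((W.length : Int) + k) 1).foldl
      (fun mp j => mp.set j.toNat v) (W ++ List.replicate Z (0 : Int))
    = W ++ List.replicate k v ++ List.replicate (Z - k) (0 : Int) := by
  intro k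
  induction k with
  | zero =>
      intro W Z _
      rw [PySem.List.pyRange_one_eq_nil (by omega)]
      simp
  | succ k ih =>
      intro W Z hk
      rw [PySem.List.pyRange_one_cons (by omega)]
      simp only [List.foldl_cons]
      obtain ⟨Z', rfl⟩ : ∃ Z', Z = Z' + 1 := ⟨Z - 1, by omega⟩
      have hset : ((W ++ List.replicate (Z' + 1) (0 : Int)).set (W.length : Int).toNat v)
          = (W ++ [v]) ++ List.replicate Z' 0 := by
        rw [Int.toNat_natCast]
        rw [List.set_append_right _ _ le_rfl]
        simp [List.replicate_succ]
      rw [hset]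
      have hlen : (W.length : Int) + 1 = ((W ++ [v]).length : Int) := by simp
      have hend : (W.length : Int) + (k + 1 : Nat) = ((W ++ [v]).length : Int) + k := by
        simp; push_cast; ring
      rw [hend, hlen, ih (W ++ [v]) Z' (by omega)]
      have hz2 : Z' + 1 - (k + 1) = Z' - k := by omega
      rw [hz2, List.replicate_succ]
      simp

/-- B's outer fold over the descending borders produces the block decomposition. -/
lemma pvFold_blocks (n : Nat) : ∀ (ds : List Int) (W : List Int) (hi : Int),
    (W.length : Int) = (n : Int) - hi → 0 ≤ hi → hi ≤ (n : Int) → pvChain ds hi →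
    (ds.foldl (fun (st : List Int × Int) v =>
        let h : Int := (n : Int) - v + 1
        ((PySem.List.pyRange st.2 h 1).foldl (fun mp j => mp.set j.toNat v) st.1, h))
      (W ++ List.replicate (hi + 1).toNat (0 : Int), (n : Int) - hi)).1
    = W ++ pvBlocks ds hi := by
  intro ds
  induction ds with
  | nil => intro W hi _ _ _ _; simp [pvBlocks]
  | cons v ds ih =>
      intro W hi hW h0 hn hc
      obtain ⟨hv1, hvhi, hcds⟩ := hc
      simp only [List.foldl_cons]
      have hrange : (n : Int) - v + 1 = (W.length : Int) + (((hi - v + 1).toNat : Nat) : Int) := by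
        rw [hW]; omega
      rw [hrange, ← hW]
      rw [pvFill v (hi - v + 1).toNat W (hi + 1).toNat (by omega)]
      have hZ : (hi + 1).toNat - (hi - v + 1).toNat = ((v - 1) + 1).toNat := by omega
      rw [hZ]
      have hW' : (((W ++ List.replicate (hi - v + 1).toNat v).length : Int)) = (n : Int) - (v - 1) := by
        simp; omega
      have hstart : (W.length : Int) + (((hi - v + 1).toNat : Nat) : Int) = (n : Int) - (v - 1) := by
        rw [hW]; omega
      rw [hstart]
      rw [ih (W ++ List.replicate (hi - v + 1).toNat v) (v - 1) hW' (by omega) (by omega) hcds]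
      simp [pvBlocks, List.append_assoc]

/-- The border list of a prefix z-array is a well-formed descending chain. -/
lemma pvBorders_chain (zs : List Int) : pvChain (pvBorders zs).reverse zs.length := by
  induction zs using List.reverseRecOn with
  | nil => simp [pvBorders, PySem.List.enumerate_nil]; trivial
  | append_singleton xs z ih =>
      rw [pvBorders_append]
      by_cases hz : z = (xs.length : Int) + 1
      · rw [if_pos hz]
        simp only [List.reverse_append, List.reverse_singleton, List.singleton_append,
          List.length_append, List.length_singleton]
        refine ⟨by omega, by push_cast; omega, ?_⟩
        have : (xs.length : Int) + 1 - 1 = (xs.length : Int) := by ring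
        rw [this]
        exact ih
      · rw [if_neg hz]
        simp only [List.append_nil, List.length_append, List.length_singleton]
        exact pvChain_mono _ _ _ (by push_cast; omega) ih

theorem matched_prefix_spec : Claim_equal_matched_prefix := by
  intro zs _
  unfold Spec_matched_prefix matched_prefix matched_prefix_alt
  have hA := matched_prefix_invariant zs zs.length le_rfl
  simp only [List.take_length, Nat.sub_self, List.replicate_zero, List.nil_append] at hA
  simp only []
  rw [hA, (pvGo_blocks zs).1]
  have hB := pvFold_blocks zs.length (pvBorders zs).reverse [] (zs.length : Int)
    (by simp) (by omega) le_rfl (pvBorders_chain zs)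
  simp only [List.length_nil, Nat.cast_zero, sub_self, List.nil_append] at hB
  have hrep : ((zs.length : Int) + 1).toNat = zs.length + 1 := by omega
  rw [hrep] at hB
  exact hB.symm
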